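-- pv_equiv track=rewrite | github.com/SmashingBumpkin/Python | boxBreaker/factorizable.py | factorizable3
-- ===== SOURCE A (Python) =====
-- def factorizable3(n,X):
--     numbers = set()
--     numbers.add(1)
--     for x in X:
--         if x <= 1:
--             pass
--         nextNumbers = set()
--         nextNumbers.add(1)
--         for number in numbers:
--             prod = number*x
--             while prod <= n:
--                 nextNumbers.add(prod)
--                 if prod == n:
--                     return True
--                 prod = prod*x
--         numbers = nextNumbers
--     return False
-- ===== SOURCE B (Python) =====
-- def factorizable3(n, X):
--     # True iff n is a product of positive powers of a contiguous window of X: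
--     # recursive divisibility search over window starts, memoised on (quotient, position).
--     if n < 2:
--         return False
--     L = len(X)
--     memo = {}
--
--     def ok(q, j):
--         # True iff q == X[j]^e * (product of a further contiguous run), e >= 1.
--         if j == L:
--             return False
--         key = (q, j)
--         if key in memo:
--             return memo[key]
--         res = False
--         x = X[j]
--         while q % x == 0:
--             q //= x
--             if q == 1 or ok(q, j + 1):
--                 res = True
--                 break
--         memo[key] = res
--         return res
--
--     return any(ok(n, i) for i in range(L))
-- ===== Notes on version B (the rewrite author's own statement) =====
-- stated objective: alternative
-- what changed: A grows breadth-first sets of all window products up to n; B instead runs a recursive divisibility search over window start positions, dividing n down by each base and memoising (quotient, position), so only divisors of n are ever visited; Pre_ restricts to the natural domain of bases >= 2 (plus non-positive targets with every base > n, where A returns False): with a base <= 1 and a positive target A's inner while loop diverges on most such inputs, and on the remaining negative-base or non-positive-target inputs A's 'prod <= n' pruning makes the returned Boolean accidental.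
-- outside the precondition, e.g. on factorizable3(-4, [-4]): A returns True, B returns False; on factorizable3(1, [1]): A returns True, B returns False; on factorizable3(4, [-2]): A returns True, B returns True
import Mathlib
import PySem

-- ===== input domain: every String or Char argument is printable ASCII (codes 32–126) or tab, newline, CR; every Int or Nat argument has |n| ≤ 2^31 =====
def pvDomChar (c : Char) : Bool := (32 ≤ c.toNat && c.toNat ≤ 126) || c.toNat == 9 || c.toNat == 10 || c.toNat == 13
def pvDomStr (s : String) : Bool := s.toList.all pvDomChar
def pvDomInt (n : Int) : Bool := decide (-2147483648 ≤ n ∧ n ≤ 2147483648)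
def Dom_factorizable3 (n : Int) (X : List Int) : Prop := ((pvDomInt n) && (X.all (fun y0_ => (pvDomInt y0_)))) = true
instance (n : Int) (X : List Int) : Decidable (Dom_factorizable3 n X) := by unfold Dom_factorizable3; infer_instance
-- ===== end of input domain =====

-- B replaces A's breadth-first expansion of product sets by a memoised recursive
-- divisibility search over window start positions (alternative algorithm, same value on Pre_).

-- ===== PORT A =====

def pvFuel (n : Int) : Nat := n.natAbs + 2

-- 'while prod <= n: …' of A (fuel: inside Pre_ the loop runs at most |n|+1 times)
def pvChainA (n x : Int) : Nat → Int → PySem.Set Int → PySem.Set Int × Bool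
  | 0, _, acc => (acc, false)
  | fuel + 1, prod, acc =>
    if prod ≤ n then
      let acc' := PySem.Set.add acc prod
      if prod = n then (acc', true)
      else pvChainA n x fuel (prod * x) acc'
    else (acc, false)

-- 'for number in numbers: …' of A (second component true = 'return True')
def pvInnerA (n x : Int) : List Int → PySem.Set Int → PySem.Set Int × Bool
  | [], acc => (acc, false)
  | m :: ms, acc =>
    match pvChainA n x (pvFuel n) (m * x) acc with
    | (acc', true) => (acc', true)
    | (acc', false) => pvInnerA n x ms acc'

-- 'for x in X: …' of A ('if x <= 1: pass' in the source is a no-op and is dropped)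
def pvLoopA (n : Int) : List Int → PySem.Set Int → Bool
  | [], _ => false
  | x :: xs, numbers =>
    match pvInnerA n x numbers (PySem.Set.add PySem.Set.empty 1) with
    | (_, true) => true
    | (nxt, false) => pvLoopA n xs nxt

def factorizable3 (n : Int) (X : List Int) : Bool :=
  pvLoopA n X (PySem.Set.add PySem.Set.empty 1)

-- ===== PORT B =====

mutual
-- the 'while q % x == 0: …' loop of ok (fuel: under Pre_ it runs at most log2 q ≤ |q| times)
def pvWhileB (q x j : Int) (xs : List Int) (memo : PySem.Dict (Int × Int) Bool) (fuel : Nat) :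
    Bool × PySem.Dict (Int × Int) Bool :=
  match fuel with
  | 0 => (false, memo)
  | f + 1 =>
    if PySem.Int.mod q x = 0 then
      let q' := PySem.Int.floordiv q x
      if q' = 1 then (true, memo)
      else
        match pvOkB q' (j + 1) xs memo with
        | (true, m') => (true, m')
        | (false, m') => pvWhileB q' x j xs m' f
    else (false, memo)
  termination_by (xs.length, 1, fuel)

-- 'def ok(q, j): …' of B; 'tail' is X[j:], so 'j == len(X)' is 'tail == []'
def pvOkB (q j : Int) (tail : List Int) (memo : PySem.Dict (Int × Int) Bool) :
    Bool × PySem.Dict (Int × Int) Bool :=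
  match tail with
  | [] => (false, memo)
  | x :: xs =>
    match PySem.Dict.get? memo (q, j) with
    | some b => (b, memo)
    | none =>
      match pvWhileB q x j xs memo (q.natAbs + 1) with
      | (res, m') => (res, PySem.Dict.insert m' (q, j) res)
  termination_by (tail.length, 0, 0)
end

-- 'any(ok(n, i) for i in range(L))' of B, threading the shared memo
def pvStartsB (n : Int) : Int → List Int → PySem.Dict (Int × Int) Bool → Bool
  | _, [], _ => false
  | j, x :: xs, memo =>
    match pvOkB n j (x :: xs) memo with
    | (true, _) => true
    | (false, m') => pvStartsB n (j + 1) xs m'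

def factorizable3_alt (n : Int) (X : List Int) : Bool :=
  if n < 2 then false else pvStartsB n 0 X PySem.Dict.empty

-- ===== PRECONDITION & SPEC =====
-- Pre_ admits the natural domain of bases ≥ 2 (any n) and the non-positive targets with all
-- bases > n (where A returns False); it excludes inputs with a base ≤ 1 and a positive target,
-- on which A's inner while loop diverges on most inputs (bases -1, 0, 1, or a negative base
-- carried into a later base) and its 'prod <= n' pruning makes the remaining returned Booleans
-- accidental, and non-positive targets with a base ≤ n, where only a literal single-step hit
-- can fire (A(-4,[-4]) is True).
def Pre_factorizable3 (n : Int) (X : List Int) : Prop :=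
  (∀ x ∈ X, 2 ≤ x) ∨ (n ≤ 0 ∧ ∀ x ∈ X, n < x)
instance (n : Int) (X : List Int) : Decidable (Pre_factorizable3 n X) := by
  unfold Pre_factorizable3; infer_instance

def pvWitness_factorizable3 : Int × List Int := (6, [2, 3])

def Spec_factorizable3 (n : Int) (X : List Int) (out : Bool) : Prop := out = factorizable3_alt n X
instance (n : Int) (X : List Int) (out : Bool) : Decidable (Spec_factorizable3 n X out) := by
  unfold Spec_factorizable3; infer_instance

-- ===== CLAIM (what is proved, stated in full; the proofs are below) =====
def Claim_equal_factorizable3 : Prop := ∀ (n : Int) (X : List Int), Dom_factorizable3 n X → Pre_factorizable3 n X → Spec_factorizable3 n X (factorizable3 n X)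

-- ===== LEMMAS AND PROOFS =====

-- 'n is a product of powers (exponents ≥ 1) of a contiguous run starting at the head of xs,
-- possibly stopping early': the common specification both ports are proved against.
def Win (q : Int) : List Int → Prop
  | [] => False
  | x :: xs => ∃ e : Nat, ∃ r : Int, q = x ^ (e + 1) * r ∧ (r = 1 ∨ Win r xs)

def RepW (n : Int) : List Int → Prop
  | [] => False
  | x :: xs => Win n (x :: xs) ∨ RepW n xs

-- A-side reachability: from seed m, multiply by x^(e+1) per step, keeping partials ≤ n
def HitM (n : Int) : Int → List Int → Prop
  | _, [] => False
  | m, x :: xs => (∃ e : Nat, m * x ^ (e + 1) = n) ∨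
                  (∃ e : Nat, m * x ^ (e + 1) ≤ n ∧ HitM n (m * x ^ (e + 1)) xs)

def RepM (n : Int) : List Int → Prop
  | [] => False
  | x :: xs => HitM n 1 (x :: xs) ∨ RepM n xs

def MemoInv (X : List Int) (memo : PySem.Dict (Int × Int) Bool) : Prop :=
  ∀ q j b, memo.get? (q, j) = some b → (b = true ↔ Win q (X.drop j.toNat))

-- ---- A-side characterizations ----

theorem pvChainA_not_le {n x prod : Int} {acc : PySem.Set Int} (f : Nat) (h : ¬ prod ≤ n) :
    pvChainA n x (f + 1) prod acc = (acc, false) := by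
  simp [pvChainA, h]

theorem pvChainA_char (n x : Int) (hx : 2 ≤ x) :
    ∀ (fuel : Nat) (prod : Int) (acc : PySem.Set Int), 1 ≤ prod → (n - prod).toNat < fuel →
      ((pvChainA n x fuel prod acc).2 = true ↔ ∃ k : Nat, prod * x ^ k = n) ∧
      ((pvChainA n x fuel prod acc).2 = false →
        ∀ v, v ∈ (pvChainA n x fuel prod acc).1 ↔ v ∈ acc ∨ ∃ k : Nat, v = prod * x ^ k ∧ v ≤ n) := by
  intro fuel
  induction fuel with
  | zero => intro prod acc _ hf; omega
  | succ f ih =>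
    intro prod acc hp hf
    have hxpow : ∀ k : Nat, (1 : Int) ≤ x ^ k := fun k => one_le_pow₀ (by omega)
    have hmono : ∀ k : Nat, prod ≤ prod * x ^ k := fun k =>
      le_mul_of_one_le_right (by omega) (hxpow k)
    by_cases hle : prod ≤ n
    · by_cases heq : prod = n
      · have hred : pvChainA n x (f + 1) prod acc = (PySem.Set.add acc prod, true) := by
          simp [pvChainA, if_pos hle, if_pos heq]
        rw [hred]
        exact ⟨⟨fun _ => ⟨0, by simp [heq]⟩, fun _ => rfl⟩, fun h => by simp at h⟩
      · have hstep : prod + 1 ≤ prod * x := by nlinarith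
        have hp' : (1 : Int) ≤ prod * x := by omega
        have hf' : (n - prod * x).toNat < f := by omega
        have ihh := ih (prod * x) (PySem.Set.add acc prod) hp' hf'
        have hred : pvChainA n x (f + 1) prod acc = pvChainA n x f (prod * x) (PySem.Set.add acc prod) := by
          simp [pvChainA, if_pos hle, if_neg heq]
        rw [hred]
        constructor
        · rw [ihh.1]
          constructor
          · rintro ⟨k, hk⟩
            exact ⟨k + 1, by rw [← hk, pow_succ]; ring⟩
          · rintro ⟨k, hk⟩
            cases k with
            | zero => simp at hk; omega
            | succ k => exact ⟨k, by rw [← hk, pow_succ]; ring⟩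
        · intro hfl v
          rw [ihh.2 hfl v, PySem.Set.mem_add]
          constructor
          · rintro ((hv | hv) | ⟨k, hk, hkn⟩)
            · exact Or.inl hv
            · exact Or.inr ⟨0, by simp [hv], by omega⟩
            · exact Or.inr ⟨k + 1, by rw [hk, pow_succ]; ring, hkn⟩
          · rintro (hv | ⟨k, hk, hkn⟩)
            · exact Or.inl (Or.inl hv)
            · cases k with
              | zero => exact Or.inl (Or.inr (by simp at hk; omega))
              | succ k => exact Or.inr ⟨k, by rw [hk, pow_succ]; ring, hkn⟩
    · have hno : ∀ k : Nat, ¬ (prod * x ^ k ≤ n) := fun k h => hle (le_trans (hmono k) h)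
      rw [pvChainA_not_le f hle]
      refine ⟨⟨fun h => by simp at h, fun ⟨k, hk⟩ => absurd (le_of_eq hk) (hno k)⟩, ?_⟩
      intro _ v
      constructor
      · exact fun hv => Or.inl hv
      · rintro (hv | ⟨k, hk, hkn⟩)
        · exact hv
        · exact absurd hkn (by rw [hk]; exact hno k)

theorem pvInnerA_char (n x : Int) (hx : 2 ≤ x) :
    ∀ (ms : List Int) (acc : PySem.Set Int), (∀ m ∈ ms, 1 ≤ m) →
      ((pvInnerA n x ms acc).2 = true ↔ ∃ m ∈ ms, ∃ k : Nat, m * x ^ (k + 1) = n) ∧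
      ((pvInnerA n x ms acc).2 = false →
        ∀ v, v ∈ (pvInnerA n x ms acc).1 ↔ v ∈ acc ∨ ∃ m ∈ ms, ∃ k : Nat, v = m * x ^ (k + 1) ∧ v ≤ n) := by
  intro ms
  induction ms with
  | nil => intro acc _; simp [pvInnerA]
  | cons m ms ih =>
    intro acc hms
    have hm : (1 : Int) ≤ m := hms m (List.mem_cons_self)
    have hmx : (1 : Int) ≤ m * x := by nlinarith
    have hfuel : (n - m * x).toNat < pvFuel n := by
      unfold pvFuel; omega
    have hch := pvChainA_char n x hx (pvFuel n) (m * x) acc hmx hfuel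
    rcases hres : pvChainA n x (pvFuel n) (m * x) acc with ⟨acc', fl⟩
    rw [hres] at hch
    cases fl with
    | true =>
      have hred : pvInnerA n x (m :: ms) acc = (acc', true) := by
        simp [pvInnerA, hres]
      rw [hred]
      refine ⟨⟨fun _ => ?_, fun _ => rfl⟩, fun h => by simp at h⟩
      rcases hch.1.mp rfl with ⟨k, hk⟩
      exact ⟨m, List.mem_cons_self, k, by rw [← hk, pow_succ]; ring⟩
    | false =>
      have hred : pvInnerA n x (m :: ms) acc = pvInnerA n x ms acc' := by
        simp [pvInnerA, hres]
      rw [hred]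
      have hmem := hch.2 rfl
      have ihh := ih acc' (fun m' hm' => hms m' (List.mem_cons_of_mem m hm'))
      have hnotm : ¬ ∃ k : Nat, m * x ^ (k + 1) = n := by
        rintro ⟨k, hk⟩
        have : (pvChainA n x (pvFuel n) (m * x) acc).2 = true := by
          rw [hres]
          exact hch.1.mpr ⟨k, by rw [← hk, pow_succ]; ring⟩
        rw [hres] at this; simp at this
      constructor
      · rw [ihh.1]
        constructor
        · rintro ⟨m', hm', hk⟩
          exact ⟨m', List.mem_cons_of_mem m hm', hk⟩
        · rintro ⟨m', hm', k, hk⟩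
          rcases List.mem_cons.mp hm' with h | h
          · exact absurd ⟨k, by rw [← h]; exact hk⟩ hnotm
          · exact ⟨m', h, k, hk⟩
      · intro hfl v
        rw [ihh.2 hfl v, hmem v]
        constructor
        · rintro ((hv | ⟨k, hk, hkn⟩) | ⟨m', hm', k, hk, hkn⟩)
          · exact Or.inl hv
          · exact Or.inr ⟨m, List.mem_cons_self, k, by rw [hk, pow_succ]; ring, hkn⟩
          · exact Or.inr ⟨m', List.mem_cons_of_mem m hm', k, hk, hkn⟩
        · rintro (hv | ⟨m', hm', k, hk, hkn⟩)
          · exact Or.inl (Or.inl hv)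
          · rcases List.mem_cons.mp hm' with h | h
            · exact Or.inl (Or.inr ⟨k, by rw [hk, h, pow_succ]; ring, hkn⟩)
            · exact Or.inr ⟨m', h, k, hk, hkn⟩

theorem pvInnerA_skip (n x : Int) :
    ∀ (ms : List Int) (acc : PySem.Set Int), (∀ m ∈ ms, ¬ (m * x ≤ n)) →
      pvInnerA n x ms acc = (acc, false) := by
  intro ms
  induction ms with
  | nil => intro acc _; simp [pvInnerA]
  | cons m ms ih =>
    intro acc h
    have hch : pvChainA n x (pvFuel n) (m * x) acc = (acc, false) := by
      rw [show pvFuel n = (n.natAbs + 1) + 1 from rfl]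
      exact pvChainA_not_le _ (h m List.mem_cons_self)
    simp only [pvInnerA]
    rw [hch]
    exact ih acc (fun m' hm' => h m' (List.mem_cons_of_mem m hm'))

theorem loopA_trivial (n : Int) :
    ∀ (xs : List Int), (∀ x ∈ xs, ¬ (x ≤ n)) →
      pvLoopA n xs (PySem.Set.add PySem.Set.empty 1) = false := by
  intro xs
  induction xs with
  | nil => intro _; simp [pvLoopA]
  | cons x xs ih =>
    intro hxs
    have hskip := pvInnerA_skip n x (PySem.Set.add PySem.Set.empty 1) (PySem.Set.add PySem.Set.empty 1)
      (by
        intro m hm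
        have : m = 1 := by simpa [PySem.Set.mem_add, PySem.Set.empty] using hm
        subst this
        simpa using hxs x List.mem_cons_self)
    simp only [pvLoopA]
    rw [hskip]
    exact ih (fun x' hx' => hxs x' (List.mem_cons_of_mem x hx'))

theorem hitM_one_repM (n : Int) : ∀ (xs : List Int), HitM n 1 xs → RepM n xs := by
  intro xs h
  cases xs with
  | nil => exact absurd h (by simp [HitM])
  | cons x xs => exact Or.inl h

theorem loopA_char (n : Int) (hn : 2 ≤ n) :
    ∀ (xs : List Int), (∀ x ∈ xs, 2 ≤ x) → ∀ S : PySem.Set Int,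
      1 ∈ S → (∀ v ∈ S, 1 ≤ v ∧ v ≤ n) →
      (pvLoopA n xs S = true ↔ (∃ m ∈ S, HitM n m xs) ∨ RepM n xs) := by
  intro xs
  induction xs with
  | nil =>
    intro _ S _ _
    simp [pvLoopA, HitM, RepM]
  | cons x xs ih =>
    intro hxs S hS1 hSb
    have hx : 2 ≤ x := hxs x List.mem_cons_self
    have hxpow : ∀ k : Nat, (1 : Int) ≤ x ^ (k + 1) := fun k => one_le_pow₀ (by omega)
    have hSm : ∀ m ∈ S, 1 ≤ m := fun m hm => (hSb m hm).1
    have hA := pvInnerA_char n x hx S (PySem.Set.add PySem.Set.empty 1) hSm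
    rcases hres : pvInnerA n x S (PySem.Set.add PySem.Set.empty 1) with ⟨S', fl⟩
    rw [hres] at hA
    cases fl with
    | true =>
      have hred : pvLoopA n (x :: xs) S = true := by
        simp only [pvLoopA]; rw [hres]
      rw [hred]
      rcases hA.1.mp rfl with ⟨m, hm, k, hk⟩
      exact ⟨fun _ => Or.inl ⟨m, hm, Or.inl ⟨k, hk⟩⟩, fun _ => rfl⟩
    | false =>
      have hnoteq : ¬ ∃ m ∈ S, ∃ k : Nat, m * x ^ (k + 1) = n := by
        intro h; have := hA.1.mpr h; simp at this
      have hmem : ∀ v, v ∈ S' ↔ v = 1 ∨ ∃ m ∈ S, ∃ k : Nat, v = m * x ^ (k + 1) ∧ v ≤ n := by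
        intro v
        have h := hA.2 rfl v
        simpa [PySem.Set.mem_add, PySem.Set.empty] using h
      have hred : pvLoopA n (x :: xs) S = pvLoopA n xs S' := by
        simp only [pvLoopA]; rw [hres]
      rw [hred]
      have h1' : 1 ∈ S' := (hmem 1).mpr (Or.inl rfl)
      have hb' : ∀ v ∈ S', 1 ≤ v ∧ v ≤ n := by
        intro v hv
        rcases (hmem v).mp hv with h | ⟨m, hm, k, hk, hkn⟩
        · omega
        · have := hSm m hm
          have := hxpow k
          constructor
          · rw [hk]; nlinarith
          · exact hkn
      rw [ih (fun x' hx' => hxs x' (List.mem_cons_of_mem x hx')) S' h1' hb']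
      constructor
      · rintro (⟨v, hv, hHit⟩ | hrep)
        · rcases (hmem v).mp hv with h | ⟨m, hm, k, hk, hkn⟩
          · subst h
            exact Or.inr (Or.inr (hitM_one_repM n xs hHit))
          · exact Or.inl ⟨m, hm, Or.inr ⟨k, by rw [← hk]; exact ⟨hkn, hHit⟩⟩⟩
        · exact Or.inr (Or.inr hrep)
      · rintro (⟨m, hm, hHit⟩ | hrep)
        · rcases hHit with ⟨k, hk⟩ | ⟨k, hkn, hHit⟩
          · exact absurd ⟨m, hm, k, hk⟩ hnoteq
          · exact Or.inl ⟨m * x ^ (k + 1), (hmem _).mpr (Or.inr ⟨m, hm, k, rfl, hkn⟩), hHit⟩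
        · rcases hrep with hhead | htail
          · rcases hhead with ⟨k, hk⟩ | ⟨k, hkn, hHit⟩
            · exact absurd ⟨1, hS1, k, hk⟩ hnoteq
            · exact Or.inl ⟨1 * x ^ (k + 1), (hmem _).mpr (Or.inr ⟨1, hS1, k, rfl, hkn⟩), hHit⟩
          · exact Or.inr htail

-- ---- B-side characterizations ----

theorem win_iff_step (q x : Int) (xs : List Int) :
    Win q (x :: xs) ↔ ∃ q' : Int, q = x * q' ∧ (q' = 1 ∨ Win q' xs ∨ Win q' (x :: xs)) := by
  constructor
  · rintro ⟨e, r, hq, hr⟩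
    refine ⟨x ^ e * r, by rw [hq, pow_succ]; ring, ?_⟩
    cases e with
    | zero =>
      rcases hr with h | h
      · exact Or.inl (by simp [h])
      · exact Or.inr (Or.inl (by simpa using h))
    | succ e =>
      exact Or.inr (Or.inr ⟨e, r, rfl, hr⟩)
  · rintro ⟨q', hq, h1 | hw | ⟨e, r, hq', hr⟩⟩
    · exact ⟨0, 1, by simp [hq, h1], Or.inl rfl⟩
    · exact ⟨0, q', by simpa using hq, Or.inr hw⟩
    · exact ⟨e + 1, r, by rw [hq, hq', pow_succ]; ring, hr⟩

theorem win_two : ∀ (xs : List Int), (∀ y ∈ xs, 2 ≤ y) → ∀ r : Int, Win r xs → 2 ≤ r := by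
  intro xs
  induction xs with
  | nil => intro _ r h; exact absurd h (by simp [Win])
  | cons x xs ih =>
    rintro hxs r ⟨e, r', hq, hr⟩
    have hx : 2 ≤ x := hxs x List.mem_cons_self
    have hxp : 2 ≤ x ^ (e + 1) := le_trans hx (le_self_pow₀ (by omega) (by omega))
    rcases hr with h | h
    · rw [hq, h]; omega
    · have := ih (fun y hy => hxs y (List.mem_cons_of_mem x hy)) r' h
      rw [hq]; nlinarith

theorem okB_char (X : List Int) (hX : ∀ y ∈ X, 2 ≤ y) :
    ∀ (tail : List Int) (q j : Int) (memo : PySem.Dict (Int × Int) Bool),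
      2 ≤ q → 0 ≤ j → X.drop j.toNat = tail → MemoInv X memo →
      ((pvOkB q j tail memo).1 = true ↔ Win q tail) ∧ MemoInv X (pvOkB q j tail memo).2 := by
  intro tail
  induction tail with
  | nil =>
    intro q j memo _ _ _ hInv
    exact ⟨by simp [pvOkB, Win], by simpa [pvOkB] using hInv⟩
  | cons x xs ih =>
    intro q j memo hq hj hdrop hInv
    have hsub : ∀ y ∈ (x :: xs), y ∈ X := by
      intro y hy
      rw [← hdrop] at hy
      exact List.mem_of_mem_drop hy
    have hx : 2 ≤ x := hX x (hsub x List.mem_cons_self)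
    have hdrop' : X.drop (j + 1).toNat = xs := by
      have h1 : (j + 1).toNat = j.toNat + 1 := by omega
      rw [h1, ← List.tail_drop, hdrop]
      rfl
    -- characterize the while loop, by induction on its fuel
    have hwhile : ∀ (f : Nat) (q : Int) (memo : PySem.Dict (Int × Int) Bool),
        2 ≤ q → q.natAbs < f → MemoInv X memo →
        ((pvWhileB q x j xs memo f).1 = true ↔ Win q (x :: xs)) ∧
        MemoInv X (pvWhileB q x j xs memo f).2 := by
      intro f
      induction f with
      | zero => intro q memo _ hf; omega
      | succ f ihf =>
        intro q memo hq hf hInv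
        by_cases hdvd : PySem.Int.mod q x = 0
        · have hxdvd : x ∣ q := (PySem.Int.mod_eq_zero_iff_dvd q x).mp hdvd
          have hfd : PySem.Int.floordiv q x = q / x :=
            PySem.Int.floordiv_eq_ediv_of_pos (by omega)
          have hqq : x * (q / x) = q := Int.mul_ediv_cancel' hxdvd
          have hq'pos : 1 ≤ q / x := by nlinarith
          have hq'lt : q / x < q := by nlinarith
          by_cases hone : q / x = 1
          · have hred : pvWhileB q x j xs memo (f + 1) = (true, memo) := by
              simp only [pvWhileB, if_pos hdvd, hfd, if_pos hone]
            rw [hred]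
            refine ⟨⟨fun _ => ⟨0, 1, ?_, Or.inl rfl⟩, fun _ => rfl⟩, hInv⟩
            rw [pow_one, mul_one, ← hqq, hone, mul_one]
          · have hq2 : 2 ≤ q / x := by omega
            have hok := ih (q / x) (j + 1) memo hq2 (by omega) hdrop' hInv
            rcases hres : pvOkB (q / x) (j + 1) xs memo with ⟨b, m'⟩
            rw [hres] at hok
            have hwin_iff : Win q (x :: xs) ↔ ((q / x) = 1 ∨ Win (q / x) xs ∨ Win (q / x) (x :: xs)) := by
              rw [win_iff_step]
              constructor
              · rintro ⟨q', hq', hcase⟩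
                have : q' = q / x := by
                  have : x * q' = x * (q / x) := by rw [hqq, ← hq']
                  exact (mul_left_cancel₀ (by omega) this)
                rwa [this] at hcase
              · intro h
                exact ⟨q / x, hqq.symm, h⟩
            cases b with
            | true =>
              have hred : pvWhileB q x j xs memo (f + 1) = (true, m') := by
                simp only [pvWhileB, if_pos hdvd, hfd, if_neg hone, hres]
              rw [hred]
              refine ⟨⟨fun _ => ?_, fun _ => rfl⟩, hok.2⟩
              exact hwin_iff.mpr (Or.inr (Or.inl (hok.1.mp rfl)))
            | false =>
              have hred : pvWhileB q x j xs memo (f + 1) = pvWhileB (q / x) x j xs m' f := by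
                simp only [pvWhileB, if_pos hdvd, hfd, if_neg hone, hres]
              rw [hred]
              have hfuel' : (q / x).natAbs < f := by omega
              have hrec := ihf (q / x) m' hq2 hfuel' hok.2
              refine ⟨?_, hrec.2⟩
              rw [hrec.1, hwin_iff]
              have hnw : ¬ Win (q / x) xs := fun h => by
                have := hok.1.mpr h; simp at this
              constructor
              · exact fun h => Or.inr (Or.inr h)
              · rintro (h | h | h)
                · exact absurd h hone
                · exact absurd h hnw
                · exact h
        · have hred : pvWhileB q x j xs memo (f + 1) = (false, memo) := by
            simp only [pvWhileB, if_neg hdvd]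
          rw [hred]
          refine ⟨⟨fun h => by simp at h, fun hw => ?_⟩, hInv⟩
          rcases (win_iff_step q x xs).mp hw with ⟨q', hq', _⟩
          exact absurd ((PySem.Int.mod_eq_zero_iff_dvd q x).mpr ⟨q', hq'⟩) hdvd
    -- now the body of ok
    rcases hget : PySem.Dict.get? memo (q, j) with _ | b
    · rcases hwres : pvWhileB q x j xs memo (q.natAbs + 1) with ⟨res, m'⟩
      have hw := hwhile (q.natAbs + 1) q memo hq (by omega) hInv
      rw [hwres] at hw
      have hred : pvOkB q j (x :: xs) memo = (res, PySem.Dict.insert m' (q, j) res) := by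
        simp only [pvOkB]
        rw [hget, hwres]
      rw [hred]
      refine ⟨hw.1, ?_⟩
      intro q0 j0 b0 hg
      rw [PySem.Dict.get?_insert] at hg
      by_cases hk : ((q0, j0) : Int × Int) = (q, j)
      · rw [if_pos hk] at hg
        have hq0 : q0 = q := (Prod.mk.injEq .. ▸ hk).1
        have hj0 : j0 = j := (Prod.mk.injEq .. ▸ hk).2
        have hb0 : b0 = res := by injection hg with h; exact h.symm
        rw [hq0, hj0, hb0, hdrop]
        exact hw.1
      · rw [if_neg hk] at hg
        exact hw.2 q0 j0 b0 hg
    · have hred : pvOkB q j (x :: xs) memo = (b, memo) := by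
        simp only [pvOkB]
        rw [hget]
      rw [hred]
      refine ⟨?_, hInv⟩
      have := hInv q j b hget
      rwa [hdrop] at this

theorem startsB_char (X : List Int) (hX : ∀ y ∈ X, 2 ≤ y) (n : Int) (hn : 2 ≤ n) :
    ∀ (tail : List Int) (j : Int) (memo : PySem.Dict (Int × Int) Bool),
      0 ≤ j → X.drop j.toNat = tail → MemoInv X memo →
      (pvStartsB n j tail memo = true ↔ RepW n tail) := by
  intro tail
  induction tail with
  | nil => intro j memo _ _ _; simp [pvStartsB, RepW]
  | cons x xs ih =>
    intro j memo hj hdrop hInv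
    have hok := okB_char X hX (x :: xs) n j memo hn hj hdrop hInv
    rcases hres : pvOkB n j (x :: xs) memo with ⟨b, m'⟩
    rw [hres] at hok
    have hdrop' : X.drop (j + 1).toNat = xs := by
      have h1 : (j + 1).toNat = j.toNat + 1 := by omega
      rw [h1, ← List.tail_drop, hdrop]
      rfl
    cases b with
    | true =>
      have hred : pvStartsB n j (x :: xs) memo = true := by
        simp only [pvStartsB]; rw [hres]
      rw [hred]
      exact ⟨fun _ => Or.inl (hok.1.mp rfl), fun _ => rfl⟩
    | false =>
      have hred : pvStartsB n j (x :: xs) memo = pvStartsB n (j + 1) xs m' := by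
        simp only [pvStartsB]; rw [hres]
      rw [hred, ih (j + 1) m' (by omega) hdrop' hok.2]
      have hnw : ¬ Win n (x :: xs) := fun h => by
        have := hok.1.mpr h; simp at this
      constructor
      · exact fun h => Or.inr h
      · rintro (h | h)
        · exact absurd h hnw
        · exact h

-- ---- bridge: A's reachability with seed 1 is exactly the window-product property ----

theorem hitM_to_win (n : Int) :
    ∀ (xs : List Int), (∀ y ∈ xs, 2 ≤ y) → ∀ m : Int, 1 ≤ m → HitM n m xs →
      ∃ r : Int, m * r = n ∧ Win r xs := by
  intro xs
  induction xs with
  | nil => intro _ m _ h; exact absurd h (by simp [HitM])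
  | cons x xs ih =>
    rintro hxs m hm (⟨e, he⟩ | ⟨e, hle, hHit⟩)
    · exact ⟨x ^ (e + 1), he, e, 1, by ring, Or.inl rfl⟩
    · have hx : 2 ≤ x := hxs x List.mem_cons_self
      have hxp : (1 : Int) ≤ x ^ (e + 1) := one_le_pow₀ (by omega)
      have hm' : 1 ≤ m * x ^ (e + 1) := by nlinarith
      rcases ih (fun y hy => hxs y (List.mem_cons_of_mem x hy)) _ hm' hHit with ⟨r', hr', hw⟩
      exact ⟨x ^ (e + 1) * r', by rw [← hr']; ring, e, r', rfl, Or.inr hw⟩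

theorem win_to_hitM (n : Int) (hn : 1 ≤ n) :
    ∀ (xs : List Int), (∀ y ∈ xs, 2 ≤ y) → ∀ m r : Int, 1 ≤ m → m * r = n → Win r xs →
      HitM n m xs := by
  intro xs
  induction xs with
  | nil => intro _ m r _ _ h; exact absurd h (by simp [Win])
  | cons x xs ih =>
    rintro hxs m r hm hmr ⟨e, r', hr, hcase⟩
    have hx : 2 ≤ x := hxs x List.mem_cons_self
    have hxp : (1 : Int) ≤ x ^ (e + 1) := one_le_pow₀ (by omega)
    rcases hcase with h1 | hw
    · exact Or.inl ⟨e, by rw [← hmr, hr, h1]; ring⟩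
    · have hr2 : 2 ≤ r' := win_two xs (fun y hy => hxs y (List.mem_cons_of_mem x hy)) r' hw
      have hm' : 1 ≤ m * x ^ (e + 1) := by nlinarith
      have hmr' : (m * x ^ (e + 1)) * r' = n := by rw [← hmr, hr]; ring
      have hle : m * x ^ (e + 1) ≤ n := by nlinarith
      exact Or.inr ⟨e, hle, ih (fun y hy => hxs y (List.mem_cons_of_mem x hy)) _ r' hm' hmr' hw⟩

theorem hitM_one_iff_win (n : Int) (hn : 2 ≤ n) (xs : List Int) (hxs : ∀ y ∈ xs, 2 ≤ y) :
    HitM n 1 xs ↔ Win n xs := by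
  constructor
  · intro h
    rcases hitM_to_win n xs hxs 1 (by omega) h with ⟨r, hr, hw⟩
    rwa [show r = n from by omega] at hw
  · intro h
    exact win_to_hitM n (by omega) xs hxs 1 n (by omega) (one_mul n) h

theorem repM_iff_repW (n : Int) (hn : 2 ≤ n) :
    ∀ (xs : List Int), (∀ y ∈ xs, 2 ≤ y) → (RepM n xs ↔ RepW n xs) := by
  intro xs
  induction xs with
  | nil => intro _; simp [RepM, RepW]
  | cons x xs ih =>
    intro hxs
    have htail := ih (fun y hy => hxs y (List.mem_cons_of_mem x hy))
    have hhead := hitM_one_iff_win n hn (x :: xs) hxs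
    constructor
    · rintro (h | h)
      · exact Or.inl (hhead.mp h)
      · exact Or.inr (htail.mp h)
    · rintro (h | h)
      · exact Or.inl (hhead.mpr h)
      · exact Or.inr (htail.mpr h)

-- ===== VERDICT (by name: the statement is the Claim_ definition above) =====
theorem factorizable3_spec : Claim_equal_factorizable3 := by
  intro n X _ hpre
  unfold Spec_factorizable3 factorizable3 factorizable3_alt
  by_cases hn : n < 2
  · rw [if_pos hn]
    apply loopA_trivial
    intro x hx
    rcases hpre with h | ⟨hn0, h⟩
    · have := h x hx; omega
    · have := h x hx; omega
  · have hn2 : 2 ≤ n := by omega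
    have hX : ∀ x ∈ X, 2 ≤ x := by
      rcases hpre with h | ⟨hn0, _⟩
      · exact h
      · omega
    rw [if_neg hn]
    have hA := loopA_char n hn2 X hX (PySem.Set.add PySem.Set.empty 1)
      (by simp [PySem.Set.empty])
      (by
        intro v hv
        have : v = 1 := by simpa [PySem.Set.mem_add, PySem.Set.empty] using hv
        omega)
    have hB := startsB_char X hX n hn2 X 0 PySem.Dict.empty (by omega)
      (by simp)
      (by intro q j b h; simp [PySem.Dict.get?_empty] at h)
    have hiff : pvLoopA n X (PySem.Set.add PySem.Set.empty 1) = true ↔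
        pvStartsB n 0 X PySem.Dict.empty = true := by
      rw [hA, hB, ← repM_iff_repW n hn2 X hX]
      constructor
      · rintro (⟨m, hm, hHit⟩ | h)
        · have : m = 1 := by simpa [PySem.Set.mem_add, PySem.Set.empty] using hm
          subst this
          exact hitM_one_repM n X hHit
        · exact h
      · exact fun h => Or.inr h
    rcases h1 : pvLoopA n X (PySem.Set.add PySem.Set.empty 1) with _ | _
      <;> rcases h2 : pvStartsB n 0 X PySem.Dict.empty with _ | _
      <;> rw [h1, h2] at hiff <;> simp_all
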